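-- pv_equiv track=rewrite | github.com/samidisjg/debugforge-bugfix-mas | src/bug_fixing_mas/root_cause_agent/tool_code_search.py | _term_weight
-- ===== SOURCE A (Python) =====
-- def _term_weight(term: str, snippet: str) -> int:
--     normalized = term.lower().strip()
--     lowered = snippet.lower()
--     score = 1
--     if normalized in {"divide", "zero", "arithmeticerror"} and ("divide" in lowered or "return 0" in lowered or "== 0" in lowered):
--         score += 4
--     if normalized in {"error", "exception", "onstatus"} and any(token in lowered for token in ["exception", "onstatus", "throw", "catch", "error"]):
--         score += 3
--     if normalized in {"validation", "valueerror", "illegalargumentexception"} and any(token in lowered for token in ["valueerror", "illegalargumentexception", "validate", "required"]):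
--         score += 3
--     if normalized in {"lock", "thread", "concurrency", "mutex", "atomic", "shared state"} and any(token in lowered for token in ["lock", "thread", "mutex", "atomic", "synchronized"]):
--         score += 3
--     return score
-- ===== SOURCE B (Python) =====
-- # Each normalized term belongs to at most one rule set (the sets are disjoint),
-- # so a single dict lookup replaces scanning all four branches.
-- _CATEGORY = {}
-- for _terms, _tokens, _w in [
--     (("divide", "zero", "arithmeticerror"), ("divide", "return 0", "== 0"), 4),
--     (("error", "exception", "onstatus"), ("exception", "onstatus", "throw", "catch", "error"), 3),
--     (("validation", "valueerror", "illegalargumentexception"),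
--      ("valueerror", "illegalargumentexception", "validate", "required"), 3),
--     (("lock", "thread", "concurrency", "mutex", "atomic", "shared state"),
--      ("lock", "thread", "mutex", "atomic", "synchronized"), 3),
-- ]:
--     for _t in _terms:
--         _CATEGORY[_t] = (_tokens, _w)
--
--
-- def _term_weight(term: str, snippet: str) -> int:
--     entry = _CATEGORY.get(term.lower().strip())
--     if entry is None:
--         return 1
--     tokens, weight = entry
--     lowered = snippet.lower()
--     if any(token in lowered for token in tokens):
--         return 1 + weight
--     return 1
-- ===== Notes on version B (the rewrite author's own statement) =====
-- stated objective: simpler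
-- what changed: Since the four term sets are disjoint, B replaces the four sequential set-membership if-branches with a single hash lookup (term -> (tokens, weight)) followed by one token scan and early returns; A always tests all four branches, B tests at most one.
import Mathlib
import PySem

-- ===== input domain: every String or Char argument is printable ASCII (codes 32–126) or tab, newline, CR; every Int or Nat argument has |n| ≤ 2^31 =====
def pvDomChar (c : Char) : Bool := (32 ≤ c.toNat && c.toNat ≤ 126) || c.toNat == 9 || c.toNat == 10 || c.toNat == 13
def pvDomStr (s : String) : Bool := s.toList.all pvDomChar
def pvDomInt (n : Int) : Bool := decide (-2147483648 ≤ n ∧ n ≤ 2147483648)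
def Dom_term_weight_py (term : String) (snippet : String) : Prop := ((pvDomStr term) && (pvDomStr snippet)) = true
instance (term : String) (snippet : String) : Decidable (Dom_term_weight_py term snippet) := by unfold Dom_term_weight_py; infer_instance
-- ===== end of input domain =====

-- B: the four term sets are disjoint, so one dict lookup (term -> tokens,weight) with
-- early returns replaces testing all four branches; return-value equivalence only.

-- ===== PORT A =====
def term_weight_py (term : String) (snippet : String) : Int :=
  let normalized := PySem.Str.strip (PySem.Str.lower term)
  let lowered := PySem.Str.lower snippet
  let score : Int := 1
  let score := if (normalized == "divide" || normalized == "zero" || normalized == "arithmeticerror")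
      && (PySem.Str.isIn "divide" lowered || PySem.Str.isIn "return 0" lowered || PySem.Str.isIn "== 0" lowered)
    then score + 4 else score
  let score := if (normalized == "error" || normalized == "exception" || normalized == "onstatus")
      && ["exception", "onstatus", "throw", "catch", "error"].any (fun token => PySem.Str.isIn token lowered)
    then score + 3 else score
  let score := if (normalized == "validation" || normalized == "valueerror" || normalized == "illegalargumentexception")
      && ["valueerror", "illegalargumentexception", "validate", "required"].any (fun token => PySem.Str.isIn token lowered)
    then score + 3 else score
  let score := if (normalized == "lock" || normalized == "thread" || normalized == "concurrency"
        || normalized == "mutex" || normalized == "atomic" || normalized == "shared state")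
      && ["lock", "thread", "mutex", "atomic", "synchronized"].any (fun token => PySem.Str.isIn token lowered)
    then score + 3 else score
  score

-- ===== PORT B =====
-- the module-level dict _CATEGORY of Source B, written out in its insertion order
def pvCategory : PySem.Dict String (List String × Int) := PySem.Dict.mk
  [ ("divide", (["divide", "return 0", "== 0"], 4)),
    ("zero", (["divide", "return 0", "== 0"], 4)),
    ("arithmeticerror", (["divide", "return 0", "== 0"], 4)),
    ("error", (["exception", "onstatus", "throw", "catch", "error"], 3)),
    ("exception", (["exception", "onstatus", "throw", "catch", "error"], 3)),
    ("onstatus", (["exception", "onstatus", "throw", "catch", "error"], 3)),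
    ("validation", (["valueerror", "illegalargumentexception", "validate", "required"], 3)),
    ("valueerror", (["valueerror", "illegalargumentexception", "validate", "required"], 3)),
    ("illegalargumentexception", (["valueerror", "illegalargumentexception", "validate", "required"], 3)),
    ("lock", (["lock", "thread", "mutex", "atomic", "synchronized"], 3)),
    ("thread", (["lock", "thread", "mutex", "atomic", "synchronized"], 3)),
    ("concurrency", (["lock", "thread", "mutex", "atomic", "synchronized"], 3)),
    ("mutex", (["lock", "thread", "mutex", "atomic", "synchronized"], 3)),
    ("atomic", (["lock", "thread", "mutex", "atomic", "synchronized"], 3)),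
    ("shared state", (["lock", "thread", "mutex", "atomic", "synchronized"], 3)) ]

def term_weight_py_alt (term : String) (snippet : String) : Int :=
  match pvCategory.get? (PySem.Str.strip (PySem.Str.lower term)) with
  | none => 1
  | some (tokens, weight) =>
    let lowered := PySem.Str.lower snippet
    if tokens.any (fun token => PySem.Str.isIn token lowered) then 1 + weight else 1

-- ===== PRECONDITION & SPEC =====
def Spec_term_weight_py (term : String) (snippet : String) (out : Int) : Prop := out = term_weight_py_alt term snippet
instance (term : String) (snippet : String) (out : Int) : Decidable (Spec_term_weight_py term snippet out) := by unfold Spec_term_weight_py; infer_instance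

-- ===== CLAIM =====
def Claim_equal_term_weight_py : Prop := ∀ (term : String) (snippet : String), Dom_term_weight_py term snippet → Spec_term_weight_py term snippet (term_weight_py term snippet)

-- ===== LEMMAS AND PROOFS =====
set_option maxHeartbeats 2000000 in
theorem term_weight_eq (term : String) (snippet : String) :
    term_weight_py term snippet = term_weight_py_alt term snippet := by
  unfold term_weight_py term_weight_py_alt
  simp only [List.any_cons, List.any_nil, Bool.or_false]
  generalize PySem.Str.strip (PySem.Str.lower term) = n
  generalize PySem.Str.lower snippet = l
  by_cases h1 : n = "divide"; · subst h1; simp [pvCategory, PySem.Dict.get?_mk_cons, or_assoc]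
  by_cases h2 : n = "zero"; · subst h2; simp [pvCategory, PySem.Dict.get?_mk_cons, or_assoc]
  by_cases h3 : n = "arithmeticerror"; · subst h3; simp [pvCategory, PySem.Dict.get?_mk_cons, or_assoc]
  by_cases h4 : n = "error"; · subst h4; simp [pvCategory, PySem.Dict.get?_mk_cons]
  by_cases h5 : n = "exception"; · subst h5; simp [pvCategory, PySem.Dict.get?_mk_cons]
  by_cases h6 : n = "onstatus"; · subst h6; simp [pvCategory, PySem.Dict.get?_mk_cons]
  by_cases h7 : n = "validation"; · subst h7; simp [pvCategory, PySem.Dict.get?_mk_cons]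
  by_cases h8 : n = "valueerror"; · subst h8; simp [pvCategory, PySem.Dict.get?_mk_cons]
  by_cases h9 : n = "illegalargumentexception"; · subst h9; simp [pvCategory, PySem.Dict.get?_mk_cons]
  by_cases h10 : n = "lock"; · subst h10; simp [pvCategory, PySem.Dict.get?_mk_cons]
  by_cases h11 : n = "thread"; · subst h11; simp [pvCategory, PySem.Dict.get?_mk_cons]
  by_cases h12 : n = "concurrency"; · subst h12; simp [pvCategory, PySem.Dict.get?_mk_cons]
  by_cases h13 : n = "mutex"; · subst h13; simp [pvCategory, PySem.Dict.get?_mk_cons]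
  by_cases h14 : n = "atomic"; · subst h14; simp [pvCategory, PySem.Dict.get?_mk_cons]
  by_cases h15 : n = "shared state"; · subst h15; simp [pvCategory, PySem.Dict.get?_mk_cons]
  simp [pvCategory, beq_iff_eq, h1, h2, h3, h4, h5, h6, h7, h8,
    h9, h10, h11, h12, h13, h14, h15, Ne.symm h1, Ne.symm h2, Ne.symm h3, Ne.symm h4, Ne.symm h5,
    Ne.symm h6, Ne.symm h7, Ne.symm h8, Ne.symm h9, Ne.symm h10, Ne.symm h11, Ne.symm h12,
    Ne.symm h13, Ne.symm h14, Ne.symm h15, PySem.Dict.get?]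

-- ===== VERDICT =====
theorem term_weight_py_spec : Claim_equal_term_weight_py := by
  intro term snippet _
  unfold Spec_term_weight_py
  exact term_weight_eq term snippet
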